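-- pv_equiv track=rewrite | github.com/nobulart/littoral | src/extract/narrative_fallback.py | _sectioned_paragraphs
-- ===== SOURCE A (Python) =====
-- def _sectioned_paragraphs(text: str) -> list[tuple[str | None, str]]:
--     section: str | None = None
--     paragraphs: list[tuple[str | None, str]] = []
--     current: list[str] = []
--     for raw_line in text.splitlines():
--         line = " ".join(raw_line.split())
--         if not line:
--             if current:
--                 paragraphs.append((section, " ".join(current)))
--                 current = []
--             continue
--         if line.startswith("#"):
--             if current:
--                 paragraphs.append((section, " ".join(current)))
--                 current = []
--             section = line.strip("# ").strip() or section
--             continue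
--         if _looks_like_short_heading(line):
--             if current:
--                 paragraphs.append((section, " ".join(current)))
--                 current = []
--             section = line
--             continue
--         current.append(line)
--     if current:
--         paragraphs.append((section, " ".join(current)))
--     return paragraphs
--
-- def _looks_like_short_heading(line: str) -> bool:
--     if len(line) > 80 or len(line.split()) > 8:
--         return False
--     lowered = line.lower().strip(":")
--     return lowered in {
--         "nw gozo",
--         "nw malta",
--         "ne malta",
--         "se malta",
--         "sikka il-bajda",
--         "western sector of the submerged palaeolandscape",
--         "northeastern sector of the submerged palaeolandscape",
--         "southeastern sector of the submerged palaeolandscape",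
--     }
-- ===== SOURCE B (Python) =====
-- def _sectioned_paragraphs(text: str) -> list[tuple[str | None, str]]:
--     lines = [" ".join(raw.split()) for raw in text.splitlines()]
--     return _emit(None, lines)
--
--
-- def _is_content(line: str) -> bool:
--     return bool(line) and not line.startswith("#") and not _looks_like_short_heading(line)
--
--
-- def _emit(section, lines):
--     out = []
--     while lines:
--         head, rest = lines[0], lines[1:]
--         if _is_content(head):
--             k = 0
--             while k < len(rest) and _is_content(rest[k]):
--                 k += 1
--             out.append((section, " ".join([head] + rest[:k])))
--             lines = rest[k:]
--         else:
--             if head.startswith("#"):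
--                 section = head.strip("# ").strip() or section
--             elif head:
--                 section = head
--             lines = rest
--     return out
--
--
-- def _looks_like_short_heading(line: str) -> bool:
--     if len(line) > 80 or len(line.split()) > 8:
--         return False
--     lowered = line.lower().strip(":")
--     return lowered in {
--         "nw gozo",
--         "nw malta",
--         "ne malta",
--         "se malta",
--         "sikka il-bajda",
--         "western sector of the submerged palaeolandscape",
--         "northeastern sector of the submerged palaeolandscape",
--         "southeastern sector of the submerged palaeolandscape",
--     }
-- ===== Notes on version B (the rewrite author's own statement) =====
-- stated objective: alternative
-- what changed: Classify-then-group: B first normalizes all lines, then extracts maximal runs of content lines as whole paragraphs (run extraction per emitted paragraph), instead of A's interleaved running buffer with three flush sites.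
import Mathlib
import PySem

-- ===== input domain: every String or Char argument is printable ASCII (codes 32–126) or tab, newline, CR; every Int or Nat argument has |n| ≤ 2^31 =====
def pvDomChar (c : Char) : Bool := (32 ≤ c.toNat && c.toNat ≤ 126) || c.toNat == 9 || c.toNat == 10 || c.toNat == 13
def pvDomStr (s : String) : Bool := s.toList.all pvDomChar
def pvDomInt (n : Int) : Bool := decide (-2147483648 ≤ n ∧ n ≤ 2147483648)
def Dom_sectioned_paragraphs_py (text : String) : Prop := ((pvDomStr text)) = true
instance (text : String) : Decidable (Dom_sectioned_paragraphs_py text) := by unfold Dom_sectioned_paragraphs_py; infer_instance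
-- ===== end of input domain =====

-- B replaces A's interleaved running buffer (three flush sites) by classify-then-group:
-- normalize all lines first, then emit each maximal run of content lines as one paragraph
-- (objective: alternative decomposition, same cost).

-- ===== PORT A =====
-- helper _looks_like_short_heading (shared by both Pythons verbatim)
def pvHeading (line : String) : Bool :=
  if 80 < PySem.Str.len line ∨ 8 < (PySem.Str.split₀ line).length then false
  else
    let lowered := PySem.Str.stripChars (PySem.Str.lower line) ":"
    lowered == "nw gozo" || lowered == "nw malta" || lowered == "ne malta" ||
    lowered == "se malta" || lowered == "sikka il-bajda" ||
    lowered == "western sector of the submerged palaeolandscape" ||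
    lowered == "northeastern sector of the submerged palaeolandscape" ||
    lowered == "southeastern sector of the submerged palaeolandscape"

-- line = " ".join(raw.split())
def pvNorm (raw : String) : String := PySem.Str.join " " (PySem.Str.split₀ raw)

-- the body of A's for-loop: state (sect, paras, cur0)
def pvAStep (st : Option String × List (Option String × String) × List String) (raw : String) :
    Option String × List (Option String × String) × List String :=
  match st with
  | (sect, paras, cur0) =>
    let line := pvNorm raw
    if line = "" then
      if cur0 = [] then (sect, paras, [])
      else (sect, paras ++ [(sect, PySem.Str.join " " cur0)], [])
    else if PySem.Str.startswith line "#" then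
      let paras := if cur0 = [] then paras
        else paras ++ [(sect, PySem.Str.join " " cur0)]
      let s := PySem.Str.strip (PySem.Str.stripChars line "# ")
      ((if s ≠ "" then some s else sect), paras, [])
    else if pvHeading line then
      let paras := if cur0 = [] then paras
        else paras ++ [(sect, PySem.Str.join " " cur0)]
      (some line, paras, [])
    else (sect, paras, cur0 ++ [line])

def sectioned_paragraphs_py (text : String) : List (Option String × String) :=
  match (PySem.Str.splitlines text).foldl pvAStep (none, [], []) with
  | (sect, paras, cur0) =>
    if cur0 = [] then paras
    else paras ++ [(sect, PySem.Str.join " " cur0)]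

-- ===== PORT B =====
def pvIsContent (line : String) : Bool :=
  !(line == "") && !(PySem.Str.startswith line "#") && !(pvHeading line)

-- _emit: extract the maximal run of content lines as one paragraph, else update sect
def pvEmit (sect : Option String) (lines : List String) : List (Option String × String) :=
  match lines with
  | [] => []
  | head :: rest =>
    if pvIsContent head then
      (sect, PySem.Str.join " " (head :: rest.takeWhile pvIsContent)) ::
        pvEmit sect (rest.dropWhile pvIsContent)
    else
      let sect :=
        if PySem.Str.startswith head "#" then
          let s := PySem.Str.strip (PySem.Str.stripChars head "# ")
          if s ≠ "" then some s else sect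
        else if head ≠ "" then some head else sect
      pvEmit sect rest
termination_by lines.length
decreasing_by
  · exact Nat.lt_succ_of_le (List.length_dropWhile_le _ _)
  · simp

def sectioned_paragraphs_py_alt (text : String) : List (Option String × String) :=
  pvEmit none ((PySem.Str.splitlines text).map pvNorm)

-- ===== PRECONDITION & SPEC =====
def Spec_sectioned_paragraphs_py (text : String) (out : List (Option String × String)) : Prop := out = sectioned_paragraphs_py_alt text
instance (text : String) (out : List (Option String × String)) : Decidable (Spec_sectioned_paragraphs_py text out) := by unfold Spec_sectioned_paragraphs_py; infer_instance

-- ===== CLAIM (what is proved, stated in full; the proofs are below) =====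
def Claim_equal_sectioned_paragraphs_py : Prop := ∀ (text : String), Dom_sectioned_paragraphs_py text → Spec_sectioned_paragraphs_py text (sectioned_paragraphs_py text)

-- ===== LEMMAS AND PROOFS =====

-- Main invariant: running A's loop from state (sec, acc, cur) over raws, then flushing,
-- yields acc followed by B's grouped output, where a pending nonempty cur merges with
-- the leading content run of the remaining normalized lines.
theorem pv_main (raws : List String) : ∀ (sec : Option String)
    (acc : List (Option String × String)) (cur : List String),
    (if (raws.foldl pvAStep (sec, acc, cur)).2.2 = [] then (raws.foldl pvAStep (sec, acc, cur)).2.1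
     else (raws.foldl pvAStep (sec, acc, cur)).2.1 ++
       [((raws.foldl pvAStep (sec, acc, cur)).1,
         PySem.Str.join " " (raws.foldl pvAStep (sec, acc, cur)).2.2)])
    = acc ++ (if cur = [] then pvEmit sec (raws.map pvNorm)
        else (sec, PySem.Str.join " " (cur ++ (raws.map pvNorm).takeWhile pvIsContent)) ::
             pvEmit sec ((raws.map pvNorm).dropWhile pvIsContent)) := by
  induction raws with
  | nil =>
    intro sec acc cur
    by_cases h : cur = [] <;> simp [h, pvEmit]
  | cons r rest ih =>
    intro sec acc cur
    simp only [List.foldl_cons, List.map_cons]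
    by_cases h1 : pvNorm r = ""
    · -- blank line
      rw [show pvAStep (sec, acc, cur) r
            = (sec, (if cur = [] then acc else acc ++ [(sec, PySem.Str.join " " cur)]), []) by
          simp [pvAStep, h1]; by_cases h : cur = [] <;> simp [h]]
      rw [ih]
      by_cases h : cur = [] <;>
        simp [h, h1, pvEmit, show pvIsContent "" = false from by decide,
              show PySem.Chars.startswith [] ['#'] = false from by decide]
    · by_cases h2 : PySem.Chars.startswith (pvNorm r).toList ['#'] = true
      · -- '#' heading line
        have hc : pvIsContent (pvNorm r) = false := by simp [pvIsContent, h2]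
        rw [show pvAStep (sec, acc, cur) r
              = ((if PySem.Str.strip (PySem.Str.stripChars (pvNorm r) "# ") ≠ "" then
                    some (PySem.Str.strip (PySem.Str.stripChars (pvNorm r) "# ")) else sec),
                 (if cur = [] then acc else acc ++ [(sec, PySem.Str.join " " cur)]), []) by
            simp [pvAStep, h1, h2]]
        rw [ih]
        by_cases h : cur = [] <;>
          simp [h, hc, h2, pvEmit]
      · by_cases h3 : pvHeading (pvNorm r) = true
        · -- short heading line
          have hc : pvIsContent (pvNorm r) = false := by simp [pvIsContent, h3]
          rw [show pvAStep (sec, acc, cur) r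
                = (some (pvNorm r),
                   (if cur = [] then acc else acc ++ [(sec, PySem.Str.join " " cur)]), []) by
              simp [pvAStep, h1, h2, h3]]
          rw [ih]
          by_cases h : cur = [] <;>
            simp [h, hc, h1, h2, pvEmit]
        · -- content line
          have hc : pvIsContent (pvNorm r) = true := by
            simp [pvIsContent, h1, h2, h3]
          rw [show pvAStep (sec, acc, cur) r = (sec, acc, cur ++ [pvNorm r]) by
              simp [pvAStep, h1, h2, h3]]
          rw [ih]
          by_cases h : cur = [] <;>
            simp [h, hc, pvEmit]

-- ===== VERDICT (by name: the statement is the Claim_ definition above) =====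
theorem sectioned_paragraphs_py_spec : Claim_equal_sectioned_paragraphs_py := by
  intro text _
  unfold Spec_sectioned_paragraphs_py sectioned_paragraphs_py sectioned_paragraphs_py_alt
  show (if ((PySem.Str.splitlines text).foldl pvAStep (none, [], [])).2.2 = [] then
          ((PySem.Str.splitlines text).foldl pvAStep (none, [], [])).2.1
        else ((PySem.Str.splitlines text).foldl pvAStep (none, [], [])).2.1 ++
          [(((PySem.Str.splitlines text).foldl pvAStep (none, [], [])).1,
            PySem.Str.join " " ((PySem.Str.splitlines text).foldl pvAStep (none, [], [])).2.2)])
      = pvEmit none ((PySem.Str.splitlines text).map pvNorm)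
  rw [pv_main]
  simp
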